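-- pv_equiv track=rewrite | github.com/lvhanh270597/predict-accent-vietnam | helpers/string.py | get_hash_ngram
-- ===== SOURCE A (Python) =====
-- def get_ngram(_list, n):
--     data = []
--     nsize = len(_list)
--     if n > nsize:
--         return []
--     for i in range(nsize - n + 1):
--         data.append(_list[i : i + n])
--     return data
--
-- def get_hash_ngram(_list, n, max_v):
--     data = get_ngram(_list, n)
--     res = []
--     for item in data:
--         value = 0
--         for i in item:
--             value = value * max_v + i
--         res.append(value)
--     return res
-- ===== SOURCE B (Python) =====
-- def get_hash_ngram(_list, n, max_v):
--     # Rolling polynomial hash: first window folded once, each next window in O(1).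
--     nsize = len(_list)
--     if n > nsize:
--         return []
--     top = max_v ** (n - 1)
--     value = 0
--     for x in _list[:n]:
--         value = value * max_v + x
--     res = [value]
--     for k in range(nsize - n):
--         value = (value - _list[k] * top) * max_v + _list[k + n]
--         res.append(value)
--     return res
-- ===== Notes on version B (the rewrite author's own statement) =====
-- stated objective: faster
-- what changed: Replaces the materialisation of every n-gram slice plus an O(n) fold per window with a rolling polynomial hash that updates each window's value in O(1) from the previous one.
-- outside the precondition, e.g. on get_hash_ngram([1, 2], -1, 10): A returns [1, 0, 0, 0], B raises IndexError; on get_hash_ngram([1, 2], 0, 10): A returns [0, 0, 0], B returns [0, 0.0, 0.0]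
import Mathlib
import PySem

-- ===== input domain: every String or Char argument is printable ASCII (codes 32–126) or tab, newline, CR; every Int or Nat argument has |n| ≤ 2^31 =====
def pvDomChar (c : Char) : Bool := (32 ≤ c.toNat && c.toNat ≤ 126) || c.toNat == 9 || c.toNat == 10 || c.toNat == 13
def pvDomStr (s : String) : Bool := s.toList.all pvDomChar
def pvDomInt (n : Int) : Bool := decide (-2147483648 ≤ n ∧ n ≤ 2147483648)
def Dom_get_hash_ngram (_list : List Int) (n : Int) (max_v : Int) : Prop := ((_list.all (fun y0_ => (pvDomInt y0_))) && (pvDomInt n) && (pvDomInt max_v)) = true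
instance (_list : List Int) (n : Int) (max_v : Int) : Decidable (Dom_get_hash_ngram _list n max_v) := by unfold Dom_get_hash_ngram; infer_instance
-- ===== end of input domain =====

-- B replaces the per-window O(n) fold over every materialised n-gram slice by a rolling
-- polynomial hash updated in O(1) per window (objective: faster, asymptotic).

-- ===== PORT A =====
def get_ngram (_list : List Int) (n : Int) : List (List Int) :=
  let nsize : Int := _list.length
  if n > nsize then []
  else (PySem.List.pyRange 0 (nsize - n + 1) 1).foldl
    (fun data i => data ++ [PySem.List.slice _list (some i) (some (i + n))]) []

def get_hash_ngram (_list : List Int) (n : Int) (max_v : Int) : List Int :=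
  (get_ngram _list n).foldl
    (fun res item => res ++ [item.foldl (fun value i => value * max_v + i) 0]) []

-- ===== PORT B =====
-- `max_v ** (n - 1)`: exponent taken as a Nat — exact for every n ≥ 1 (all of Pre_).
-- `_list[k]` / `_list[k + n]`: indices are always in range under Pre_, so pyGetD is exact.
def get_hash_ngram_alt (_list : List Int) (n : Int) (max_v : Int) : List Int :=
  let nsize : Int := _list.length
  if n > nsize then []
  else
    let top := max_v ^ (n - 1).toNat
    let value0 := (PySem.List.slice _list none (some n)).foldl (fun v x => v * max_v + x) 0
    ((PySem.List.pyRange 0 (nsize - n) 1).foldl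
      (fun st k =>
        let v := (st.2 - PySem.List.pyGetD _list k 0 * top) * max_v + PySem.List.pyGetD _list (k + n) 0
        (st.1 ++ [v], v))
      ([value0], value0)).1

-- ===== PRECONDITION & SPEC =====
-- Pre_ excludes non-positive n, on which an "n-gram" is meaningless and A's values are slice
-- artefacts (negative slice ends), while B's rolling update raises or leaves the integers.
def Pre_get_hash_ngram (_list : List Int) (n : Int) (max_v : Int) : Prop := 1 ≤ n
instance (_list : List Int) (n : Int) (max_v : Int) : Decidable (Pre_get_hash_ngram _list n max_v) := by unfold Pre_get_hash_ngram; infer_instance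
def pvWitness_get_hash_ngram : List Int × Int × Int := ([1, 2, 3], 2, 10)

def Spec_get_hash_ngram (_list : List Int) (n : Int) (max_v : Int) (out : List Int) : Prop := out = get_hash_ngram_alt _list n max_v
instance (_list : List Int) (n : Int) (max_v : Int) (out : List Int) : Decidable (Spec_get_hash_ngram _list n max_v out) := by unfold Spec_get_hash_ngram; infer_instance

-- ===== CLAIM (what is proved, stated in full; the proofs are below) =====
def Claim_equal_get_hash_ngram : Prop := ∀ (_list : List Int) (n : Int) (max_v : Int), Dom_get_hash_ngram _list n max_v → Pre_get_hash_ngram _list n max_v → Spec_get_hash_ngram _list n max_v (get_hash_ngram _list n max_v)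

-- ===== LEMMAS AND PROOFS =====

-- the polynomial hash of one window, and the window starting at k
def pvH (m : Int) (l : List Int) : Int := l.foldl (fun v x => v * m + x) 0
def pvWin (l : List Int) (k nn : Nat) : List Int := (l.drop k).take nn
-- B's loop body, on Nat indices
def pvStep (l : List Int) (m : Int) (nn : Nat) (st : List Int × Int) (k : Nat) : List Int × Int :=
  let v := (st.2 - l.getD k 0 * m ^ (nn - 1)) * m + l.getD (k + nn) 0
  (st.1 ++ [v], v)

lemma pvH_init (m : Int) : ∀ (l : List Int) (a : Int),
    l.foldl (fun v x => v * m + x) a = a * m ^ l.length + l.foldl (fun v x => v * m + x) 0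
  | [], a => by simp
  | x :: l, a => by
    simp only [List.foldl_cons, List.length_cons]
    rw [pvH_init m l (a * m + x), pvH_init m l (0 * m + x)]
    ring

lemma pvH_cons (m c : Int) (t : List Int) : pvH m (c :: t) = c * m ^ t.length + pvH m t := by
  simp only [pvH, List.foldl_cons]
  rw [pvH_init m t (0 * m + c)]
  ring_nf

lemma pvH_snoc (m x : Int) (t : List Int) : pvH m (t ++ [x]) = pvH m t * m + x := by
  simp [pvH, List.foldl_append]

-- the rolling update: window k+1's hash from window k's
lemma pvRoll (l : List Int) (m : Int) (nn j : Nat) (h1 : 1 ≤ nn) (h2 : j + nn < l.length) :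
    (pvH m (pvWin l j nn) - l.getD j 0 * m ^ (nn - 1)) * m + l.getD (j + nn) 0
      = pvH m (pvWin l (j + 1) nn) := by
  obtain ⟨k, rfl⟩ : ∃ k, nn = k + 1 := ⟨nn - 1, by omega⟩
  have hj : j < l.length := by omega
  have hjk : j + 1 + k < l.length := by omega
  have ht : pvWin l j (k + 1) = l[j] :: (l.drop (j + 1)).take k := by
    unfold pvWin
    rw [List.drop_eq_getElem_cons hj, List.take_succ_cons]
  have htlen : ((l.drop (j + 1)).take k).length = k := by
    simp [List.length_take, List.length_drop]; omega
  have hwin1 : pvWin l (j + 1) (k + 1) = (l.drop (j + 1)).take k ++ [l[j + 1 + k]] := by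
    unfold pvWin
    rw [List.take_add_one, List.getElem?_drop, List.getElem?_eq_getElem hjk]
    simp
  have hidx : j + (k + 1) = j + 1 + k := by omega
  rw [ht, pvH_cons, htlen, hwin1, pvH_snoc, List.getD_eq_getElem l 0 hj, hidx,
    List.getD_eq_getElem l 0 hjk]
  simp only [Nat.add_sub_cancel]
  ring

-- the whole rolling loop produces the hashes of windows j+1 … j+mm
lemma pvRollFold (l : List Int) (m : Int) (nn : Nat) :
    ∀ (mm j : Nat) (acc : List Int), 1 ≤ nn → j + mm + nn ≤ l.length →
    (List.range' j mm).foldl (pvStep l m nn) (acc, pvH m (pvWin l j nn)) =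
      (acc ++ (List.range' (j + 1) mm).map (fun k => pvH m (pvWin l k nn)),
        pvH m (pvWin l (j + mm) nn))
  | 0, j, acc => by simp
  | mm + 1, j, acc => by
    intro h1 h2
    rw [List.range'_succ, List.foldl_cons]
    have hstep : pvStep l m nn (acc, pvH m (pvWin l j nn)) j
        = (acc ++ [pvH m (pvWin l (j + 1) nn)], pvH m (pvWin l (j + 1) nn)) := by
      simp only [pvStep]
      rw [pvRoll l m nn j h1 (by omega)]
    rw [hstep, pvRollFold l m nn mm (j + 1) _ h1 (by omega)]
    rw [List.range'_succ, List.map_cons]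
    have h3 : j + (mm + 1) = j + 1 + mm := by omega
    rw [h3]
    simp [List.append_assoc]

-- A computes the hash of every window, window by window
lemma pvA_char (l : List Int) (n m : Int) (h1 : 1 ≤ n) (h2 : n ≤ (l.length : Int)) :
    get_hash_ngram l n m
      = (List.range (l.length - n.toNat + 1)).map (fun k => pvH m (pvWin l k n.toNat)) := by
  obtain ⟨nn, rfl⟩ : ∃ nn : Nat, n = (nn : Int) := ⟨n.toNat, (Int.toNat_of_nonneg (by omega)).symm⟩
  have hle : nn ≤ l.length := by exact_mod_cast h2
  unfold get_hash_ngram get_ngram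
  simp only [if_neg (by omega : ¬ ((nn : Int) > (l.length : Int)))]
  rw [PySem.List.foldl_append_singleton_eq_map, PySem.List.foldl_append_singleton_eq_map]
  have hrange : (l.length : Int) - (nn : Int) + 1 = ((l.length - nn + 1 : Nat) : Int) := by
    push_cast; omega
  rw [hrange, PySem.List.pyRange_zero_natCast]
  simp only [List.nil_append, Int.toNat_natCast, List.map_map]
  refine List.map_congr_left ?_
  intro k _
  simp only [Function.comp]
  rw [PySem.List.slice_natCast_add]
  rfl

-- B computes the same list by the rolling loop
lemma pvB_char (l : List Int) (n m : Int) (h1 : 1 ≤ n) (h2 : n ≤ (l.length : Int)) :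
    get_hash_ngram_alt l n m
      = (List.range (l.length - n.toNat + 1)).map (fun k => pvH m (pvWin l k n.toNat)) := by
  obtain ⟨nn, rfl⟩ : ∃ nn : Nat, n = (nn : Int) := ⟨n.toNat, (Int.toNat_of_nonneg (by omega)).symm⟩
  have hle : nn ≤ l.length := by exact_mod_cast h2
  have h1' : 1 ≤ nn := by exact_mod_cast h1
  unfold get_hash_ngram_alt
  simp only [if_neg (by omega : ¬ ((nn : Int) > (l.length : Int)))]
  have hv0 : (PySem.List.slice l none (some (nn : Int))).foldl (fun v x => v * m + x) 0
      = pvH m (pvWin l 0 nn) := by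
    rw [PySem.List.slice_to_natCast]
    rfl
  have hrange : (l.length : Int) - (nn : Int) = ((l.length - nn : Nat) : Int) := by
    omega
  rw [hv0, hrange, PySem.List.pyRange_zero_natCast, List.foldl_map]
  have hnn1 : ((nn : Int) - 1).toNat = nn - 1 := by omega
  simp only [← Nat.cast_add, PySem.List.pyGetD_natCast, hnn1]
  show ((List.range (l.length - nn)).foldl (pvStep l m nn)
      ([pvH m (pvWin l 0 nn)], pvH m (pvWin l 0 nn))).1 = _
  rw [List.range_eq_range', pvRollFold l m nn (l.length - nn) 0 _ h1' (by omega)]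
  have hr : List.range' 0 (l.length - nn + 1) = 0 :: List.range' 1 (l.length - nn) := by
    rw [List.range'_succ]
  simp only [Int.toNat_natCast]
  rw [List.range_eq_range', hr, List.map_cons]
  simp

-- ===== VERDICT (by name: the statement is the Claim_ definition above) =====
theorem get_hash_ngram_spec : Claim_equal_get_hash_ngram := by
  intro l n m _ hpre
  unfold Spec_get_hash_ngram
  unfold Pre_get_hash_ngram at hpre
  by_cases h : n ≤ (l.length : Int)
  · rw [pvA_char l n m hpre h, pvB_char l n m hpre h]
  · unfold get_hash_ngram get_ngram get_hash_ngram_alt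
    simp only [if_pos (by omega : n > (l.length : Int))]
    rfl
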